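-- pv_equiv track=rewrite | github.com/sixplusgroup/dialog | emotion_backend/case_generation_evaluation/case_evaluation.py | get_customer_text_score
-- ===== SOURCE A (Python) =====
-- def get_customer_text_score(customer_text_emotions):
--     score = 80
--     pessimistic_num = 0
--     optimistic_num = 0
--     for emotion in customer_text_emotions:
--         emotion = emotion.split(' ')
--         if emotion[0] == 'optimistic':
--             optimistic_num += 1
--             score += 3
--             if len(emotion) > 1 and emotion[1] == 'thankful':
--                 score += 2
--         elif emotion[0] == 'pessimistic':
--             pessimistic_num += 1
--             score -= 5
--             if len(emotion) > 1 and emotion[1] == 'angry':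
--                 score -= 5
--     return score, pessimistic_num, optimistic_num
-- ===== SOURCE B (Python) =====
-- def get_customer_text_score(customer_text_emotions):
--     tokens = [e.split(' ') for e in customer_text_emotions]
--     optimistic_num = sum(1 for t in tokens if t[0] == 'optimistic')
--     pessimistic_num = sum(1 for t in tokens if t[0] == 'pessimistic')
--     thankful_num = sum(1 for t in tokens
--                        if t[0] == 'optimistic' and len(t) > 1 and t[1] == 'thankful')
--     angry_num = sum(1 for t in tokens
--                     if t[0] == 'pessimistic' and len(t) > 1 and t[1] == 'angry')
--     score = 80 + 3 * optimistic_num + 2 * thankful_num \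
--             - 5 * pessimistic_num - 5 * angry_num
--     return score, pessimistic_num, optimistic_num
-- ===== Notes on version B (the rewrite author's own statement) =====
-- stated objective: alternative
-- what changed: Replaced the single fused accumulation loop by four independent counting passes over the pre-split token lists plus one closed-form arithmetic formula for the score.
import Mathlib
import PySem

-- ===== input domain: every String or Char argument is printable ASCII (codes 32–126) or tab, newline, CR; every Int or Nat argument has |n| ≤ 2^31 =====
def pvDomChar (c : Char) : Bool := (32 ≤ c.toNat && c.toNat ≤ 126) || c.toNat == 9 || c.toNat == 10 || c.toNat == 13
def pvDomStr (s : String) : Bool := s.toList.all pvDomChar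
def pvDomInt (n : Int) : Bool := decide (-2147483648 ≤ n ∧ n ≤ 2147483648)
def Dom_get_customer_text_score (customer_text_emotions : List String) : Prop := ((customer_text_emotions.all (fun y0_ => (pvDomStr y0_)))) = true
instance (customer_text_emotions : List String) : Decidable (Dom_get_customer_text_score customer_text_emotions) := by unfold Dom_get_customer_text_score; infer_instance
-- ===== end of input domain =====

-- B replaces A's fused accumulation loop by independent counting passes plus a closed-form
-- score formula (objective: alternative decomposition, same O(n) cost).

-- emotion.split(' '): PySem.Str.split? returns none only for sep = "", so .getD [] is
-- unreachable here (exact). The result is always nonempty, so emotion[0] is headD ""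
-- and the length-guarded emotion[1] is getD 1 "" (the defaults are unreachable).
def pvSplitSp (s : String) : List String := (PySem.Str.split? s " ").getD []

-- ===== PORT A =====
-- A's single loop with accumulator (score, pessimistic_num, optimistic_num).
def pvStepA (st : Int × Int × Int) (emotion : String) : Int × Int × Int :=
  let (score, pess, opt) := st
  let e := pvSplitSp emotion
  if e.headD "" == "optimistic" then
    let score := score + 3
    let score := if decide (e.length > 1) && (e.getD 1 "" == "thankful") then score + 2 else score
    (score, pess, opt + 1)
  else if e.headD "" == "pessimistic" then
    let score := score - 5
    let score := if decide (e.length > 1) && (e.getD 1 "" == "angry") then score - 5 else score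
    (score, pess + 1, opt)
  else (score, pess, opt)

def get_customer_text_score (customer_text_emotions : List String) : Int × Int × Int :=
  customer_text_emotions.foldl pvStepA (80, 0, 0)

-- ===== PORT B =====
-- Four independent counting passes over the pre-split token lists, then one formula.
def pvIsOpt (t : List String) : Bool := t.headD "" == "optimistic"
def pvIsPess (t : List String) : Bool := t.headD "" == "pessimistic"
def pvIsThank (t : List String) : Bool := pvIsOpt t && (decide (t.length > 1) && (t.getD 1 "" == "thankful"))
def pvIsAngry (t : List String) : Bool := pvIsPess t && (decide (t.length > 1) && (t.getD 1 "" == "angry"))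

def get_customer_text_score_alt (customer_text_emotions : List String) : Int × Int × Int :=
  let tokens := customer_text_emotions.map pvSplitSp
  let optimistic_num : Int := tokens.countP pvIsOpt
  let pessimistic_num : Int := tokens.countP pvIsPess
  let thankful_num : Int := tokens.countP pvIsThank
  let angry_num : Int := tokens.countP pvIsAngry
  (80 + 3 * optimistic_num + 2 * thankful_num - 5 * pessimistic_num - 5 * angry_num,
   pessimistic_num, optimistic_num)

-- ===== PRECONDITION & SPEC =====
def Spec_get_customer_text_score (customer_text_emotions : List String) (out : Int × Int × Int) : Prop := out = get_customer_text_score_alt customer_text_emotions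
instance (customer_text_emotions : List String) (out : Int × Int × Int) : Decidable (Spec_get_customer_text_score customer_text_emotions out) := by unfold Spec_get_customer_text_score; infer_instance

-- ===== CLAIM (what is proved, stated in full; the proofs are below) =====
def Claim_equal_get_customer_text_score : Prop := ∀ (customer_text_emotions : List String), Dom_get_customer_text_score customer_text_emotions → Spec_get_customer_text_score customer_text_emotions (get_customer_text_score customer_text_emotions)

-- ===== LEMMAS AND PROOFS =====

lemma stepA_eq (s p o : Int) (em : String) :
    pvStepA (s, p, o) em =
      (s + (if pvIsOpt (pvSplitSp em) then 3 else 0)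
         + (if pvIsThank (pvSplitSp em) then 2 else 0)
         - (if pvIsPess (pvSplitSp em) then 5 else 0)
         - (if pvIsAngry (pvSplitSp em) then 5 else 0),
       p + (if pvIsPess (pvSplitSp em) then 1 else 0),
       o + (if pvIsOpt (pvSplitSp em) then 1 else 0)) := by
  by_cases hO : ((pvSplitSp em).headD "" == "optimistic") = true
  · have hO' : (pvSplitSp em).head?.getD "" = "optimistic" := by simpa using hO
    have hP : ((pvSplitSp em).headD "" == "pessimistic") = false := by simp [hO']
    simp only [pvStepA, pvIsThank, pvIsAngry, pvIsOpt, pvIsPess, hO, hP,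
      Bool.true_and, Bool.false_and, if_true]
    split_ifs <;> simp_all
  · by_cases hP : ((pvSplitSp em).headD "" == "pessimistic") = true
    · simp only [Bool.not_eq_true] at hO
      simp only [pvStepA, pvIsThank, pvIsAngry, pvIsOpt, pvIsPess, hO, hP,
        Bool.true_and, Bool.false_and, if_true]
      split_ifs <;> simp_all
    · simp only [Bool.not_eq_true] at hO hP
      simp only [pvStepA, pvIsThank, pvIsAngry, pvIsOpt, pvIsPess, hO, hP,
        Bool.false_and]
      simp

lemma foldl_counts (l : List String) (s p o : Int) :
    l.foldl pvStepA (s, p, o) =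
      (let tokens := l.map pvSplitSp
       (s + 3 * (tokens.countP pvIsOpt : Int) + 2 * (tokens.countP pvIsThank : Int)
          - 5 * (tokens.countP pvIsPess : Int) - 5 * (tokens.countP pvIsAngry : Int),
        p + (tokens.countP pvIsPess : Int), o + (tokens.countP pvIsOpt : Int))) := by
  induction l generalizing s p o with
  | nil => simp
  | cons hd tl ih =>
    rw [List.foldl_cons, stepA_eq, ih]
    simp only [List.map_cons, List.countP_cons, Prod.mk.injEq]
    push_cast
    refine ⟨?_, ?_, ?_⟩ <;> split_ifs <;> omega

theorem get_customer_text_score_eq (l : List String) :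
    get_customer_text_score l = get_customer_text_score_alt l := by
  rw [get_customer_text_score, foldl_counts]
  simp [get_customer_text_score_alt]

-- ===== VERDICT (by name: the statement is the Claim_ definition above) =====
theorem get_customer_text_score_spec : Claim_equal_get_customer_text_score := by
  intro l _
  unfold Spec_get_customer_text_score
  exact get_customer_text_score_eq l
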